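-- pv_equiv track=rewrite | github.com/AHCChan/Table_Tools | _Command_Line_Parser.py | Validate_List_Of_Ints_Positive
-- ===== SOURCE A (Python) =====
-- def Validate_List_Of_Ints_Positive(string, delimiter):
--     """
--     Validates a string containing multiple positive integers and returns the
--     integers as a list.
--     Return an empty list if the input is invalid.
--
--     @string
--         (str)
--         A string containing the list of numbers.
--     @delimiter
--         (str)
--         The delimiter separating the numbers from each other
--
--     Validate_List_Of_Ints(str, str) -> list<int>
--     """
--     values = string.split(delimiter)
--     result = []
--     for value in values:
--         try:
--             v = int(value)
--             if v < 1: return []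
--             result.append(v)
--         except:
--             return []
--     return result
-- ===== SOURCE B (Python) =====
-- def Validate_List_Of_Ints_Positive(string, delimiter):
--     # Streams tokens with str.partition instead of materializing a split list.
--     out = []
--     s = string
--     while True:
--         head, sep, s = s.partition(delimiter)
--         try:
--             v = int(head)
--         except:
--             return []
--         if v < 1:
--             return []
--         out.append(v)
--         if not sep:
--             return out
-- ===== Notes on version B (the rewrite author's own statement) =====
-- stated objective: alternative
-- what changed: A materializes the full token list with str.split and then validates it in a for loop; B never calls split: it streams tokens one at a time with str.partition in a while loop, consuming the remaining string suffix, so no token list is ever built.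
import Mathlib
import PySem

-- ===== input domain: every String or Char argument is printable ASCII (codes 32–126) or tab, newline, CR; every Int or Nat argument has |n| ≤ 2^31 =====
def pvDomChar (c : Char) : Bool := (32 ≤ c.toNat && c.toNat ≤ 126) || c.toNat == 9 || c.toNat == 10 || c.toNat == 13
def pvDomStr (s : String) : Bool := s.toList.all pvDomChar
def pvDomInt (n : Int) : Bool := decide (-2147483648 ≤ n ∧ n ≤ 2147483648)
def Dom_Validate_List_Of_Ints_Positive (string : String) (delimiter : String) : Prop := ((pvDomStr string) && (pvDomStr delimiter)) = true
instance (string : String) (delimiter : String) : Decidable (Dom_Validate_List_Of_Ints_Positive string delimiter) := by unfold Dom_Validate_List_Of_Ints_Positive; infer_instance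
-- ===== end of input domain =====

-- B never builds the token list: instead of split-then-validate it streams tokens one at
-- a time with str.partition in a while loop (alternative decomposition, same cost).

-- ===== PORT A =====
-- A's 'for value in values' loop with 'result' as accumulator; int() failure or v < 1 returns []
def pvLoopA : List String → List Int → List Int
  | [], result => result
  | v :: rest, result =>
    match PySem.Int.ofStr? v with
    | none => []
    | some n => if n < 1 then [] else pvLoopA rest (result ++ [n])

def Validate_List_Of_Ints_Positive (string : String) (delimiter : String) : List Int :=
  pvLoopA ((PySem.Str.split? string delimiter).getD []) []

-- ===== PORT B =====
-- hand port of str.partition for a NONEMPTY separator (no PySem primitive): exact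
-- first-occurrence split, returning (head, found?, tail)
def pvPartition (sep : List Char) : List Char → List Char × Bool × List Char
  | [] => ([], false, [])
  | c :: rest =>
    if sep.isPrefixOf (c :: rest) then ([], true, (c :: rest).drop sep.length)
    else
      let p := pvPartition sep rest
      (c :: p.1, p.2.1, p.2.2)

-- Source B's 'while True' loop; fuel = |s| + 1 bounds the iterations (each found delimiter
-- consumes at least one character), so the fuel-0 branch is never reached
def pvLoopB (delim : String) : Nat → List Char → List Int → List Int
  | 0, _, out => out
  | fuel + 1, s, out =>
    let p := pvPartition delim.toList s
    match PySem.Int.ofStr? (String.ofList p.1) with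
    | none => []
    | some v =>
      if v < 1 then []
      else if p.2.1 then pvLoopB delim fuel p.2.2 (out ++ [v]) else out ++ [v]

def Validate_List_Of_Ints_Positive_alt (string : String) (delimiter : String) : List Int :=
  if delimiter = "" then []   -- Source B's partition raises here; the input is excluded by Pre_
  else pvLoopB delimiter (string.toList.length + 1) string.toList []

-- ===== PRECONDITION & SPEC =====
-- Pre_ excludes only delimiter = "", on which both Pythons raise ValueError (split / partition)
def Pre_Validate_List_Of_Ints_Positive (_string : String) (delimiter : String) : Prop := delimiter ≠ ""
instance (string : String) (delimiter : String) : Decidable (Pre_Validate_List_Of_Ints_Positive string delimiter) := by unfold Pre_Validate_List_Of_Ints_Positive; infer_instance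
def pvWitness_Validate_List_Of_Ints_Positive : String × String := ("1,2,3", ",")

def Spec_Validate_List_Of_Ints_Positive (string : String) (delimiter : String) (out : List Int) : Prop := out = Validate_List_Of_Ints_Positive_alt string delimiter
instance (string : String) (delimiter : String) (out : List Int) : Decidable (Spec_Validate_List_Of_Ints_Positive string delimiter out) := by unfold Spec_Validate_List_Of_Ints_Positive; infer_instance

-- ===== CLAIM (what is proved, stated in full; the proofs are below) =====
def Claim_equal_Validate_List_Of_Ints_Positive : Prop := ∀ (string : String) (delimiter : String), Dom_Validate_List_Of_Ints_Positive string delimiter → Pre_Validate_List_Of_Ints_Positive string delimiter → Spec_Validate_List_Of_Ints_Positive string delimiter (Validate_List_Of_Ints_Positive string delimiter)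

-- ===== LEMMAS AND PROOFS =====

-- when partition finds the separator, the tail plus one full copy of sep fits in the input
theorem pvPartition_tail_len (sep : List Char) :
    ∀ l : List Char, (pvPartition sep l).2.1 = true →
      (pvPartition sep l).2.2.length + sep.length ≤ l.length := by
  intro l
  induction l with
  | nil => simp [pvPartition]
  | cons c rest ih =>
    intro hf
    by_cases hp : sep.isPrefixOf (c :: rest)
    · have hle : sep.length ≤ (c :: rest).length :=
        (List.isPrefixOf_iff_prefix.mp hp).length_le
      simp only [pvPartition, if_pos hp]
      simp only [List.length_cons] at hle
      simp [List.length_drop]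
      omega
    · simp only [pvPartition, if_neg hp] at hf ⊢
      have := ih hf
      simp only [List.length_cons]
      omega

-- characterization of PySem's splitOn.go, one partition step at a time
theorem go_eq (sep : List Char) (hsep : sep ≠ []) :
    ∀ fuel, ∀ l cur acc, l.length < fuel →
      PySem.Chars.splitOn.go sep fuel l cur acc =
        acc.reverse ++ [cur.reverse ++ (pvPartition sep l).1] ++
          (if (pvPartition sep l).2.1 then PySem.Chars.splitOn (pvPartition sep l).2.2 sep else []) := by
  intro fuel
  induction fuel using Nat.strong_induction_on with
  | _ fuel ih =>
    intro l cur acc hlt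
    match fuel, l with
    | 0, l => omega
    | fuel + 1, [] =>
      simp [PySem.Chars.splitOn.go, pvPartition]
    | fuel + 1, c :: rest =>
      by_cases hp : sep.isPrefixOf (c :: rest)
      · have hle : sep.length ≤ (c :: rest).length :=
          (List.isPrefixOf_iff_prefix.mp hp).length_le
        have hsl : 1 ≤ sep.length := by
          cases sep with
          | nil => exact absurd rfl hsep
          | cons a t => simp
        rw [PySem.Chars.splitOn.go]
        simp only [if_pos hp]
        have htl : ((c :: rest).drop sep.length).length < fuel := by
          simp [List.length_drop] at *; omega
        rw [ih fuel (by omega) _ [] _ htl]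
        have hsplit : PySem.Chars.splitOn ((c :: rest).drop sep.length) sep =
            [(pvPartition sep ((c :: rest).drop sep.length)).1] ++
              (if (pvPartition sep ((c :: rest).drop sep.length)).2.1 then
                PySem.Chars.splitOn (pvPartition sep ((c :: rest).drop sep.length)).2.2 sep else []) := by
          rw [PySem.Chars.splitOn,
            ih (((c :: rest).drop sep.length).length + 1) (by omega) _ [] [] (by omega)]
          simp
        conv_rhs => rw [pvPartition]
        simp only [if_pos hp, hsplit]
        simp
      · rw [PySem.Chars.splitOn.go]
        simp only [if_neg hp]
        have : rest.length < fuel := by simp at hlt; omega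
        rw [ih fuel (by omega) _ _ _ this]
        simp only [pvPartition, if_neg hp]
        simp

-- splitOn unrolled by one partition step
theorem splitOn_step (sep : List Char) (hsep : sep ≠ []) (l : List Char) :
    PySem.Chars.splitOn l sep =
      (pvPartition sep l).1 ::
        (if (pvPartition sep l).2.1 then PySem.Chars.splitOn (pvPartition sep l).2.2 sep else []) := by
  rw [PySem.Chars.splitOn, go_eq sep hsep (l.length + 1) l [] [] (by omega)]
  simp

-- B's streaming loop computes A's loop over the split token list
theorem loopB_eq (delim : String) (hd : delim.toList ≠ []) :
    ∀ fuel s out, s.length < fuel →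
      pvLoopB delim fuel s out =
        pvLoopA ((PySem.Chars.splitOn s delim.toList).map String.ofList) out := by
  intro fuel
  induction fuel using Nat.strong_induction_on with
  | _ fuel ih =>
    intro s out hlt
    match fuel with
    | 0 => omega
    | fuel + 1 =>
      rw [splitOn_step delim.toList hd s, pvLoopB]
      simp only [List.map_cons]
      cases h : PySem.Int.ofStr? (String.ofList (pvPartition delim.toList s).1) with
      | none => simp [pvLoopA, h]
      | some v =>
        by_cases hv : v < 1
        · simp [pvLoopA, h, hv]
        · simp only [pvLoopA, h, if_neg hv]
          by_cases hf : (pvPartition delim.toList s).2.1 = true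
          · have hlen := pvPartition_tail_len delim.toList s hf
            have hd1 : 1 ≤ delim.toList.length := by
              cases hdl : delim.toList with
              | nil => exact absurd hdl hd
              | cons a t => simp
            rw [if_pos hf, ih fuel (by omega) _ _ (by omega)]
            simp [hf]
          · simp only [Bool.not_eq_true] at hf
            simp [hf, pvLoopA]

-- ===== VERDICT (by name: the statement is the Claim_ definition above) =====
theorem Validate_List_Of_Ints_Positive_spec : Claim_equal_Validate_List_Of_Ints_Positive := by
  intro s d _ hpre
  unfold Spec_Validate_List_Of_Ints_Positive Validate_List_Of_Ints_Positive Validate_List_Of_Ints_Positive_alt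
  rw [if_neg hpre]
  have hd : d.toList ≠ [] := by
    intro h
    exact hpre (by have := congrArg String.ofList h; simpa using this)
  have hsplit := PySem.Str.split?_map s d
  rw [PySem.Chars.split?, if_neg (by simpa using hd)] at hsplit
  cases hts : PySem.Str.split? s d with
  | none => rw [hts] at hsplit; simp at hsplit
  | some ts =>
    rw [hts] at hsplit
    simp only [Option.map_some, Option.some.injEq] at hsplit
    rw [loopB_eq d hd _ _ _ (by omega), ← hsplit]
    simp [List.map_map, Function.comp_def]
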